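-- pv_equiv track=rewrite | github.com/kshmawj111/programmers | 2019 카카오 블라인드 채용/후보키.py | convert_as_table
-- ===== SOURCE A (Python) =====
-- def convert_as_table(relation):
--     table = {}
--
--     for r in relation:
--         for i in range(len(r)):
--             if i in table.keys():
--                 table[i].append(r[i])
--
--             else:
--                 table[i] = [r[i]]
--
--     return table
-- ===== SOURCE B (Python) =====
-- def convert_as_table(relation):
--     if not relation:
--         return {}
--     m = max(len(r) for r in relation)
--     return {i: [r[i] for r in relation if i < len(r)] for i in range(m)}
-- ===== Notes on version B (the rewrite author's own statement) =====
-- stated objective: alternative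
-- what changed: B builds the table column-major: it computes the maximum row length once and materialises each column with a single comprehension, instead of A's row-major loop with a per-element dict-membership branch.
import Mathlib
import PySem

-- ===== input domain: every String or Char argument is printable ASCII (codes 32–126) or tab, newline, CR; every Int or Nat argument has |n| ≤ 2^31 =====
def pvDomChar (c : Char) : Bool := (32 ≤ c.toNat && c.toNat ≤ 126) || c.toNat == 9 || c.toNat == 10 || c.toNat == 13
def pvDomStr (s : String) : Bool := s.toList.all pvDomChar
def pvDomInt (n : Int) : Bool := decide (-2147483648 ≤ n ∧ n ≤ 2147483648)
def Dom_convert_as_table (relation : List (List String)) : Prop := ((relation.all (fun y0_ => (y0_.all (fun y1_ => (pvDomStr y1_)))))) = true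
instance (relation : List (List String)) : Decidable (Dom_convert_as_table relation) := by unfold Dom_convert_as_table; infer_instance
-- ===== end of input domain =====

-- B rebuilds the table column-major (max row length once, then one comprehension per column)
-- instead of A's row-major dict loop; same result, a differently-shaped set of passes.

-- ===== PORT A =====
-- table = {}; for r in relation: for i in range(len(r)): append or create table[i]
def convert_as_table (relation : List (List String)) : List (Int × List String) :=
  (relation.foldl (fun table r =>
    (List.range r.length).foldl (fun table (i : Nat) =>
      match table.get? (i : Int) with
      | some v => table.insert (i : Int) (v ++ [r.getD i ""])
      | none   => table.insert (i : Int) [r.getD i ""]) table)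
    (PySem.Dict.empty : PySem.Dict Int (List String))).items

-- ===== PORT B =====
-- if not relation: return {}; m = max(len(r)...); {i: [r[i] for r in relation if i < len(r)] for i in range(m)}
def convert_as_table_alt (relation : List (List String)) : List (Int × List String) :=
  match relation with
  | [] => []
  | _ :: _ =>
    let m := (relation.map List.length).foldl max 0
    (List.range m).map (fun (i : Nat) =>
      ((i : Int), (relation.filter (fun r => decide (i < r.length))).map (fun r => r.getD i "")))

-- ===== PRECONDITION & SPEC =====
def Spec_convert_as_table (relation : List (List String)) (out : List (Int × List String)) : Prop := out = convert_as_table_alt relation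
instance (relation : List (List String)) (out : List (Int × List String)) : Decidable (Spec_convert_as_table relation out) := by unfold Spec_convert_as_table; infer_instance

-- ===== CLAIM (what is proved, stated in full; the proofs are below) =====
def Claim_equal_convert_as_table : Prop := ∀ (relation : List (List String)), Dom_convert_as_table relation → Spec_convert_as_table relation (convert_as_table relation)

-- ===== LEMMAS AND PROOFS =====

-- the canonical intermediate dict: keys 0..m-1 in order, values given by v
def pvCanon (m : Nat) (v : Nat → List String) : PySem.Dict Int (List String) :=
  PySem.Dict.mk ((List.range m).map (fun (i : Nat) => ((i : Int), v i)))

-- maximum row length of the rows processed so far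
def pvM (rel : List (List String)) : Nat := rel.foldl (fun a r => max a r.length) 0

-- column i of rel
def pvCol (i : Nat) (rel : List (List String)) : List String :=
  (rel.filter (fun r => decide (i < r.length))).map (fun r => r.getD i "")

lemma pvCanon_congr (m : Nat) (v v' : Nat → List String) (h : ∀ i, i < m → v i = v' i) :
    pvCanon m v = pvCanon m v' := by
  unfold pvCanon
  congr 1
  exact List.map_congr_left (fun i hi => by rw [h i (List.mem_range.mp hi)])

lemma pvCanon_keys (m : Nat) (v : Nat → List String) :
    (pvCanon m v).keys = (List.range m).map (fun (i : Nat) => (i : Int)) := by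
  show ((List.range m).map (fun (i : Nat) => ((i : Int), v i))).map (fun p => p.1) = _
  rw [List.map_map]
  rfl

lemma pvCanon_keys_nodup (m : Nat) (v : Nat → List String) :
    (pvCanon m v).keys.Nodup := by
  rw [pvCanon_keys]
  exact (List.nodup_range).map (fun a b h => by exact_mod_cast h)

lemma pvCanon_get?_lt (m : Nat) (v : Nat → List String) (j : Nat) (h : j < m) :
    (pvCanon m v).get? (j : Int) = some (v j) := by
  apply PySem.Dict.get?_of_mem_items (d := pvCanon m v)
  · show ((j : Int), v j) ∈ (List.range m).map (fun (i : Nat) => ((i : Int), v i))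
    exact List.mem_map.mpr ⟨j, List.mem_range.mpr h, rfl⟩
  · exact pvCanon_keys_nodup m v

lemma pvCanon_get?_ge (m : Nat) (v : Nat → List String) (j : Nat) (h : m ≤ j) :
    (pvCanon m v).get? (j : Int) = none := by
  rw [PySem.Dict.get?_eq_none_iff_not_mem_keys]
  rw [pvCanon_keys]
  intro hmem
  obtain ⟨i, hi, hij⟩ := List.mem_map.mp hmem
  have h1 : i = j := by exact_mod_cast hij
  have h2 : i < m := List.mem_range.mp hi
  omega

lemma pvCanon_insert_lt (m : Nat) (v : Nat → List String) (j : Nat) (h : j < m) (w : List String) :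
    (pvCanon m v).insert (j : Int) w = pvCanon m (fun i => if i = j then w else v i) := by
  have hc : (pvCanon m v).contains (j : Int) = true := by
    rw [PySem.Dict.contains_eq_isSome_get?, pvCanon_get?_lt m v j h]; rfl
  apply PySem.Dict.ext
  rw [PySem.Dict.items_insert_of_contains _ _ hc]
  show ((List.range m).map (fun (i : Nat) => ((i : Int), v i))).map _
      = (List.range m).map (fun (i : Nat) => ((i : Int), if i = j then w else v i))
  rw [List.map_map]
  apply List.map_congr_left
  intro i _
  by_cases hij : i = j
  · subst hij; simp
  · simp [hij]

lemma pvCanon_insert_eq (m : Nat) (v : Nat → List String) (w : List String) :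
    (pvCanon m v).insert (m : Int) w = pvCanon (m + 1) (fun i => if i = m then w else v i) := by
  have hc : (pvCanon m v).contains (m : Int) = false := by
    rw [PySem.Dict.contains_eq_isSome_get?, pvCanon_get?_ge m v m le_rfl]; rfl
  apply PySem.Dict.ext
  rw [PySem.Dict.items_insert_of_not_contains _ _ hc]
  show ((List.range m).map (fun (i : Nat) => ((i : Int), v i))) ++ [((m : Int), w)]
      = (List.range (m+1)).map (fun (i : Nat) => ((i : Int), if i = m then w else v i))
  rw [List.range_succ, List.map_append]
  congr 1
  · apply List.map_congr_left
    intro i hi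
    have : i ≠ m := by have := List.mem_range.mp hi; omega
    simp [this]
  · simp

-- one row of A's inner loop sends pvCanon m v to the canonical dict for the extended data
lemma pvInner (r : List String) (k m : Nat) (v : Nat → List String) :
    (List.range k).foldl (fun table (i : Nat) =>
      match table.get? (i : Int) with
      | some w => table.insert (i : Int) (w ++ [r.getD i ""])
      | none   => table.insert (i : Int) [r.getD i ""]) (pvCanon m v)
    = pvCanon (max m k)
        (fun i => (if i < m then v i else []) ++ (if i < k then [r.getD i ""] else [])) := by
  induction k with
  | zero =>
    simp only [List.range_zero, List.foldl_nil]
    have : max m 0 = m := by omega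
    rw [this]
    apply pvCanon_congr
    intro i hi
    simp [hi]
  | succ k ih =>
    rw [List.range_succ, List.foldl_append, ih]
    simp only [List.foldl_cons, List.foldl_nil]
    by_cases hk : k < m
    · have hmax : max m k = m := by omega
      have hmax' : max m (k + 1) = m := by omega
      rw [hmax] at *
      rw [pvCanon_get?_lt _ _ k hk]
      have hkk : ¬ (k < k) := by omega
      simp only [hkk, if_false, List.append_nil, hk, if_true]
      rw [pvCanon_insert_lt _ _ k hk, hmax']
      apply pvCanon_congr
      intro i hi
      by_cases hik : i = k
      · subst hik; simp [hk]
      · by_cases hik' : i < k <;> by_cases him : i < m <;> simp [hik, hik'] <;> omega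
    · have hkm : m ≤ k := by omega
      have hmax : max m k = k := by omega
      have hmax' : max m (k + 1) = k + 1 := by omega
      rw [hmax] at *
      rw [pvCanon_get?_ge _ _ k le_rfl]
      have hkm' : ¬ (k < m) := by omega
      rw [pvCanon_insert_eq, hmax']
      apply pvCanon_congr
      intro i hi
      by_cases hik : i = k
      · subst hik; simp [hkm']
      · have hik' : i < k := by omega
        simp [hik, hik']
        omega

lemma pvM_cons (r : List String) (rest : List (List String)) :
    pvM (r :: rest) = max r.length (pvM rest) := by
  unfold pvM
  simp only [List.foldl_cons, Nat.zero_max]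
  have : ∀ (l : List (List String)) (a b : Nat),
      l.foldl (fun a r => max a r.length) (max a b) = max a (l.foldl (fun a r => max a r.length) b) := by
    intro l
    induction l with
    | nil => intro a b; rfl
    | cons x xs ih =>
      intro a b
      simp only [List.foldl_cons]
      rw [Nat.max_assoc, ih]
  have h := this rest r.length 0
  simpa using h

lemma pvCol_cons (i : Nat) (r : List String) (rest : List (List String)) :
    pvCol i (r :: rest) = (if i < r.length then [r.getD i ""] else []) ++ pvCol i rest := by
  unfold pvCol
  by_cases h : i < r.length <;> simp [h]

-- outer loop invariant
lemma pvOuter (rel : List (List String)) : ∀ (m : Nat) (v : Nat → List String),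
    rel.foldl (fun table r =>
      (List.range r.length).foldl (fun table (i : Nat) =>
        match table.get? (i : Int) with
        | some w => table.insert (i : Int) (w ++ [r.getD i ""])
        | none   => table.insert (i : Int) [r.getD i ""]) table) (pvCanon m v)
    = pvCanon (max m (pvM rel)) (fun i => (if i < m then v i else []) ++ pvCol i rel) := by
  induction rel with
  | nil =>
    intro m v
    simp only [List.foldl_nil]
    have : max m (pvM []) = m := by unfold pvM; simp
    rw [this]
    apply pvCanon_congr
    intro i hi
    simp [hi, pvCol]
  | cons r rest ih =>
    intro m v
    simp only [List.foldl_cons]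
    rw [pvInner r r.length m v, ih]
    rw [pvM_cons]
    have hmax : max (max m r.length) (pvM rest) = max m (max r.length (pvM rest)) := by omega
    rw [hmax]
    apply pvCanon_congr
    intro i hi
    rw [pvCol_cons]
    by_cases him : i < max m r.length
    · simp only [him, if_true]
      by_cases h1 : i < m <;> by_cases h2 : i < r.length <;> simp [h1, h2]
    · have h1 : ¬ i < m := by omega
      have h2 : ¬ i < r.length := by omega
      simp [him, h1, h2]

lemma pvA_eq (rel : List (List String)) :
    convert_as_table rel = (List.range (pvM rel)).map (fun (i : Nat) => ((i : Int), pvCol i rel)) := by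
  unfold convert_as_table
  have hempty : (PySem.Dict.empty : PySem.Dict Int (List String)) = pvCanon 0 (fun _ => []) := by
    rfl
  rw [hempty, pvOuter rel 0 (fun _ => [])]
  have : max 0 (pvM rel) = pvM rel := by omega
  rw [this]
  show ((List.range (pvM rel)).map _) = _
  apply List.map_congr_left
  intro i _
  simp

lemma pvB_eq (rel : List (List String)) :
    convert_as_table_alt rel = (List.range (pvM rel)).map (fun (i : Nat) => ((i : Int), pvCol i rel)) := by
  unfold convert_as_table_alt
  cases rel with
  | nil =>
    have : pvM [] = 0 := rfl
    simp [this]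
  | cons r rest =>
    simp only []
    have hm : ((r :: rest).map List.length).foldl max 0 = pvM (r :: rest) := by
      unfold pvM
      rw [List.foldl_map]
    rw [hm]
    rfl

-- ===== VERDICT (by name: the statement is the Claim_ definition above) =====
theorem convert_as_table_spec : Claim_equal_convert_as_table := by
  intro rel _
  show convert_as_table rel = convert_as_table_alt rel
  rw [pvA_eq, pvB_eq]
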